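-- pv_equiv track=rewrite | github.com/kinaneb/PYTHON_algo | fibonacci/tp2_ex2.py | puissance_matrice_2_2_ops
-- ===== SOURCE A (Python) =====
-- def produit_matrice_2_2_ops (M1, M2) :
--   ''' produit_matrice_2_2 avec calcul du nombre d'operations arithmétiques'''
--   res = [ [0, 0], [0, 0] ]
--   res = [ [( (M1[0][0] * M2[0][0]) + (M1[0][1] * M2[1][0]) ), ( (M1[0][0] * M2[0][1]) + (M1[0][1] * M2[1][1]) )],
--           [( (M1[1][0] * M2[0][0]) + (M1[1][1] * M2[1][0]) ), ( (M1[1][0] * M2[0][1]) + (M1[1][1] * M2[1][1]) )] ]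
--   # A REMPLIR
--   return res, 12 #A REMPLIR
--
-- def puissance_matrice_2_2_ops (M, n) :
--   ''' puissance_matrice_2_2 avec calcul du nombre d'additions'''
--   if n == 0 : return [ [1, 0], [0, 1] ], 0
--   if n == 1 : return M, 0
--   tmp, opa = puissance_matrice_2_2_ops (M, n//2)
--   carre, oma = produit_matrice_2_2_ops (tmp, tmp)
--   if n%2 == 0 :
--     return carre, opa+oma + 1
--   else :
--     opa += oma
--     tmp, oma = produit_matrice_2_2_ops(M, carre)
--     return tmp, opa+oma + 1
-- ===== SOURCE B (Python) =====
-- def produit_matrice_2_2_ops (M1, M2) :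
--   ''' produit_matrice_2_2 avec calcul du nombre d'operations arithmétiques'''
--   res = [ [0, 0], [0, 0] ]
--   res = [ [( (M1[0][0] * M2[0][0]) + (M1[0][1] * M2[1][0]) ), ( (M1[0][0] * M2[0][1]) + (M1[0][1] * M2[1][1]) )],
--           [( (M1[1][0] * M2[0][0]) + (M1[1][1] * M2[1][0]) ), ( (M1[1][0] * M2[0][1]) + (M1[1][1] * M2[1][1]) )] ]
--   return res, 12
--
-- def puissance_matrice_2_2_ops (M, n) :
--   ''' iterative square-and-multiply: descending exponent chain, rebuilt bottom-up '''
--   if n == 0 : return [ [1, 0], [0, 1] ], 0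
--   if n == 1 : return M, 0
--   chain = []
--   e = n
--   while e > 1 :
--     chain.append(e)
--     e //= 2
--   res, ops = M, 0
--   for e in reversed(chain) :
--     res, pm = produit_matrice_2_2_ops(res, res)
--     ops += pm + 1
--     if e % 2 == 1 :
--       res, pm = produit_matrice_2_2_ops(M, res)
--       ops += pm
--   return res, ops
-- ===== Notes on version B (the rewrite author's own statement) =====
-- stated objective: alternative
-- what changed: Replaces A's recursive fast exponentiation by an iterative version: build the descending exponent chain n, n//2, ..., then rebuild the result bottom-up with an explicit square-and-multiply loop and a running op counter.
import Mathlib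
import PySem

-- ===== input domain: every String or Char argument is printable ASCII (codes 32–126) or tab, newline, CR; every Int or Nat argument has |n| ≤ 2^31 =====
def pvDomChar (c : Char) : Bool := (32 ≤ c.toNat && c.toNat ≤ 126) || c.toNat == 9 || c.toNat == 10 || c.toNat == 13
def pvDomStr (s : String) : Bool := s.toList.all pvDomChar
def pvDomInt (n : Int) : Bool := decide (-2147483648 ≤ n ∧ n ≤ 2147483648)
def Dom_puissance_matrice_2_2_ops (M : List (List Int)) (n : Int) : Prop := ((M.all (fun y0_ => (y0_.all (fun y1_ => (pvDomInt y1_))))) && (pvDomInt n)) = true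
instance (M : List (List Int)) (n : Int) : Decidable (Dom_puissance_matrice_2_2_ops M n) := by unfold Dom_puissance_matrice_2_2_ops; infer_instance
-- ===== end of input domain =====

-- B replaces A's recursion by an iterative bottom-up square-and-multiply over the exponent chain (alternative decomposition, same cost).

-- ===== PORT A =====
-- M[i][j] with literal non-negative indices; Pre_ guarantees in range, so the defaults are never used on admitted inputs
def pvIdx (m : List (List Int)) (i j : Int) : Int :=
  (PySem.List.pyGet? ((PySem.List.pyGet? m i).getD []) j).getD 0

def produit_matrice_2_2_ops (M1 M2 : List (List Int)) : List (List Int) × Int :=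
  ([ [ pvIdx M1 0 0 * pvIdx M2 0 0 + pvIdx M1 0 1 * pvIdx M2 1 0,
       pvIdx M1 0 0 * pvIdx M2 0 1 + pvIdx M1 0 1 * pvIdx M2 1 1 ],
     [ pvIdx M1 1 0 * pvIdx M2 0 0 + pvIdx M1 1 1 * pvIdx M2 1 0,
       pvIdx M1 1 0 * pvIdx M2 0 1 + pvIdx M1 1 1 * pvIdx M2 1 1 ] ], 12)

def puissance_matrice_2_2_ops (M : List (List Int)) (n : Int) : List (List Int) × Int :=
  if n = 0 then ([[1,0],[0,1]], 0)
  else if n = 1 then (M, 0)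
  else if n < 0 then (M, 0)  -- Python recurses forever (RecursionError) here; excluded by Pre_; guard only for totality
  else
    let r := puissance_matrice_2_2_ops M (PySem.Int.floordiv n 2)
    let c := produit_matrice_2_2_ops r.1 r.1
    if PySem.Int.mod n 2 = 0 then (c.1, r.2 + c.2 + 1)
    else
      let opa := r.2 + c.2
      let t := produit_matrice_2_2_ops M c.1
      (t.1, opa + t.2 + 1)
termination_by n.toNat
decreasing_by
  rw [PySem.Int.floordiv_eq_ediv_of_pos (by omega : (0:Int) < 2)]
  omega

-- ===== PORT B =====
-- the while loop of Source B: the descending chain n, n//2, ..., down to (but excluding) 1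
def pvChain (e : Int) : List Int :=
  if 1 < e then e :: pvChain (PySem.Int.floordiv e 2) else []
termination_by e.toNat
decreasing_by
  rw [PySem.Int.floordiv_eq_ediv_of_pos (by omega : (0:Int) < 2)]
  omega

def pvStep (M : List (List Int)) (acc : List (List Int) × Int) (e : Int) : List (List Int) × Int :=
  let p := produit_matrice_2_2_ops acc.1 acc.1
  let acc2 := (p.1, acc.2 + p.2 + 1)
  if PySem.Int.mod e 2 = 1 then
    let q := produit_matrice_2_2_ops M acc2.1
    (q.1, acc2.2 + q.2)
  else acc2

def puissance_matrice_2_2_ops_alt (M : List (List Int)) (n : Int) : List (List Int) × Int :=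
  if n = 0 then ([[1,0],[0,1]], 0)
  else if n = 1 then (M, 0)
  else (pvChain n).reverse.foldl (pvStep M) (M, 0)

-- ===== PRECONDITION & SPEC =====
-- Pre_ excludes exactly the inputs where Python A raises: n < 0 (RecursionError), and n ≥ 2 with
-- a matrix lacking the first two rows/columns (IndexError in produit_matrice_2_2_ops).
def Pre_puissance_matrice_2_2_ops (M : List (List Int)) (n : Int) : Prop :=
  0 ≤ n ∧ (n ≤ 1 ∨ (2 ≤ M.length ∧ 2 ≤ (M.getD 0 []).length ∧ 2 ≤ (M.getD 1 []).length))
instance (M : List (List Int)) (n : Int) : Decidable (Pre_puissance_matrice_2_2_ops M n) := by unfold Pre_puissance_matrice_2_2_ops; infer_instance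
def pvWitness_puissance_matrice_2_2_ops : List (List Int) × Int := ([[1,1],[1,0]], 5)

def Spec_puissance_matrice_2_2_ops (M : List (List Int)) (n : Int) (out : List (List Int) × Int) : Prop := out = puissance_matrice_2_2_ops_alt M n
instance (M : List (List Int)) (n : Int) (out : List (List Int) × Int) : Decidable (Spec_puissance_matrice_2_2_ops M n out) := by unfold Spec_puissance_matrice_2_2_ops; infer_instance

-- ===== CLAIM (what is proved, stated in full; the proofs are below) =====
def Claim_equal_puissance_matrice_2_2_ops : Prop := ∀ (M : List (List Int)) (n : Int), Dom_puissance_matrice_2_2_ops M n → Pre_puissance_matrice_2_2_ops M n → Spec_puissance_matrice_2_2_ops M n (puissance_matrice_2_2_ops M n)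

-- ===== LEMMAS AND PROOFS =====

-- one level of A's recursion (n ≥ 2) is exactly one pvStep applied to the result at n//2
theorem step_eq_level (M : List (List Int)) (n : Int) (h2 : 2 ≤ n) :
    pvStep M (puissance_matrice_2_2_ops M (PySem.Int.floordiv n 2)) n = puissance_matrice_2_2_ops M n := by
  conv_rhs => rw [puissance_matrice_2_2_ops]
  have h0 : ¬ n = 0 := by omega
  have h1 : ¬ n = 1 := by omega
  have hneg : ¬ n < 0 := by omega
  simp only [h0, h1, hneg, if_false]
  have hm : PySem.Int.mod n 2 = n % 2 := PySem.Int.mod_eq_emod_of_pos (by omega)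
  unfold pvStep
  rcases Int.emod_two_eq n with h | h <;> simp only [hm, h]
  · norm_num
  · norm_num
    omega

-- B's fold over the reversed chain computes A's result, for every exponent m ≥ 1
theorem fold_chain_eq (M : List (List Int)) (m : Int) (h1 : 1 ≤ m) :
    (pvChain m).reverse.foldl (pvStep M) (M, 0) = puissance_matrice_2_2_ops M m := by
  have H : ∀ k : Nat, ∀ m : Int, m.toNat ≤ k → 1 ≤ m →
      (pvChain m).reverse.foldl (pvStep M) (M, 0) = puissance_matrice_2_2_ops M m := by
    intro k
    induction k with
    | zero => intro m hk h1; omega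
    | succ k ih =>
      intro m hk h1
      by_cases h2 : 2 ≤ m
      · have hdiv : PySem.Int.floordiv m 2 = m / 2 :=
          PySem.Int.floordiv_eq_ediv_of_pos (by omega)
        rw [pvChain]
        simp only [show (1:Int) < m by omega, if_true, List.reverse_cons, List.foldl_append,
          List.foldl_cons, List.foldl_nil]
        rw [ih (PySem.Int.floordiv m 2) (by rw [hdiv]; omega) (by rw [hdiv]; omega)]
        exact step_eq_level M m h2
      · have hm1 : m = 1 := by omega
        subst hm1
        rw [pvChain, puissance_matrice_2_2_ops]
        norm_num
  exact H m.toNat m le_rfl h1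

-- ===== VERDICT (by name: the statement is the Claim_ definition above) =====
theorem puissance_matrice_2_2_ops_spec : Claim_equal_puissance_matrice_2_2_ops := by
  intro M n _ hpre
  unfold Spec_puissance_matrice_2_2_ops puissance_matrice_2_2_ops_alt
  by_cases h0 : n = 0
  · subst h0; rw [puissance_matrice_2_2_ops]; norm_num
  · by_cases h1 : n = 1
    · subst h1; rw [puissance_matrice_2_2_ops]; norm_num
    · simp only [h0, h1, if_false]
      exact (fold_chain_eq M n (by rcases hpre with ⟨hn, _⟩; omega)).symm
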